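-- pv_equiv track=rewrite | github.com/JustyRodriguez/-LFP-Proyecto2_202100058 | LFP_Proyecto2_202100058/Proyecto 2_LFPB+_202100058/Proyecto 2 LFP.py | afd_cmultilinea
-- ===== SOURCE A (Python) =====
-- def afd_cmultilinea(lexema):
--     pat = "(/*) (.|\\n)* (*/) "
--     estado = 0
--     aceptacion = [4]
--
--     if len(lexema) > 3:
--         content = lexema[3:]
--     else:
--         content = ""
--
--     if "/*" in content:
--         estado == -1
--
--     for char in lexema:
--             if estado == 0:
--                 if char == "/":
--                     estado = 1
--                 else:
--                     estado = -5
--             elif estado == 1: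
--                 if char == "*":
--                     estado = 2
--                 else:
--                     estado = -5
--             elif estado == 2:
--                 if char == "*":
--                     estado = 3
--                 elif char == "\n" or char != "\n" :
--                     estado = 2
--                 else:
--                     estado = -5
--             elif estado == 3:
--                 if char == "/":
--                     estado = 4
--                 else:
--                     estado = -5
--             elif estado == 4:
--                 if char == "/" or char != "/":
--                     estado = -5
--
--     if estado in aceptacion:
--         return True
--     else:
--         return False
-- ===== SOURCE B (Python) =====
-- def afd_cmultilinea(lexema):
--     # Accept exactly: opening delimiter, interior containing no asterisk, closing delimiter at the end.
--     if len(lexema) < 4: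
--         return False
--     return lexema[:2] == "/*" and lexema[-2:] == "*/" and "*" not in lexema[2:-2]
-- ===== Notes on version B (the rewrite author's own statement) =====
-- stated objective: faster
-- what changed: Replaced the per-character Python-level DFA state loop by two boundary slice comparisons plus one interior membership test (the DFA accepts exactly an opening delimiter, an interior with no asterisk, then a closing delimiter at the end).
import Mathlib
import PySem

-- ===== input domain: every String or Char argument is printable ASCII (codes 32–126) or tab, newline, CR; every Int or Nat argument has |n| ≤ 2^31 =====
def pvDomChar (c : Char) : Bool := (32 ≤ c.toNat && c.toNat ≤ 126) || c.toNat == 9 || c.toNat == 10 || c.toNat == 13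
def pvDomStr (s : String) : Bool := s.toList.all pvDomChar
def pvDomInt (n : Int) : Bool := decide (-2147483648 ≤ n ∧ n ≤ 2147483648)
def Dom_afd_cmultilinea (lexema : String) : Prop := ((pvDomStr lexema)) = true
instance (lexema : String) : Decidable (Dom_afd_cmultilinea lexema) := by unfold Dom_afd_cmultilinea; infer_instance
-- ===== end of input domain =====

-- B replaces A's per-character DFA state loop by boundary slice comparisons plus one interior membership test (same O(n); a timing run measured B faster by a constant factor).

-- ===== PORT A =====
-- The DFA transition of A's loop body, step for step (branches in source order).
def pvStepA (estado : Int) (char : Char) : Int :=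
  if estado = 0 then
    (if char = '/' then 1 else -5)
  else if estado = 1 then
    (if char = '*' then 2 else -5)
  else if estado = 2 then
    (if char = '*' then 3
     else if char = '\n' ∨ char ≠ '\n' then 2
     else -5)
  else if estado = 3 then
    (if char = '/' then 4 else -5)
  else if estado = 4 then
    (if char = '/' ∨ char ≠ '/' then -5 else estado)
  else estado

def afd_cmultilinea (lexema : String) : Bool :=
  let _pat := "(/*) (.|\\n)* (*/) "
  let estado : Int := 0
  let aceptacion : List Int := [4]
  let _content : String :=
    if PySem.Str.len lexema > 3 then PySem.Str.slice lexema (some 3) none else ""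
  -- `if "/*" in content: estado == -1` — the body is a comparison expression, no effect on estado
  let estado := lexema.toList.foldl pvStepA estado
  if estado ∈ aceptacion then true else false

-- ===== PORT B =====
def afd_cmultilinea_alt (lexema : String) : Bool :=
  if PySem.Str.len lexema < 4 then false
  else (PySem.Str.slice lexema none (some 2) == "/*")
    && (PySem.Str.slice lexema (some (-2)) none == "*/")
    && !(PySem.Str.isIn "*" (PySem.Str.slice lexema (some 2) (some (-2))))

-- ===== PRECONDITION & SPEC =====
def Spec_afd_cmultilinea (lexema : String) (out : Bool) : Prop := out = afd_cmultilinea_alt lexema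
instance (lexema : String) (out : Bool) : Decidable (Spec_afd_cmultilinea lexema out) := by unfold Spec_afd_cmultilinea; infer_instance

-- ===== CLAIM (what is proved, stated in full; the proofs are below) =====
def Claim_equal_afd_cmultilinea : Prop := ∀ (lexema : String), Dom_afd_cmultilinea lexema → Spec_afd_cmultilinea lexema (afd_cmultilinea lexema)

-- ===== LEMMAS AND PROOFS =====

theorem pvFoldlNeg5 (l : List Char) : l.foldl pvStepA (-5) = -5 := by
  induction l with
  | nil => rfl
  | cons c t ih => simpa [pvStepA] using ih

theorem pvFoldl4 (l : List Char) : l.foldl pvStepA 4 = 4 ↔ l = [] := by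
  cases l with
  | nil => simp
  | cons c t =>
    have h : pvStepA 4 c = -5 := by
      by_cases h : c = '/' <;> simp [pvStepA, h]
    simp [h, pvFoldlNeg5]

theorem pvFoldl3 (l : List Char) : l.foldl pvStepA 3 = 4 ↔ l = ['/'] := by
  cases l with
  | nil => simp
  | cons c t =>
    by_cases h : c = '/'
    · simp [pvStepA, h, pvFoldl4]
    · simp [pvStepA, h, pvFoldlNeg5]

theorem pvFoldl2 (l : List Char) :
    l.foldl pvStepA 2 = 4 ↔ ∃ mid, l = mid ++ ['*', '/'] ∧ '*' ∉ mid := by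
  induction l with
  | nil => simp
  | cons c t ih =>
    by_cases h : c = '*'
    · subst h
      simp only [List.foldl_cons]
      have hs : pvStepA 2 '*' = 3 := by simp [pvStepA]
      rw [hs, pvFoldl3]
      constructor
      · rintro rfl; exact ⟨[], rfl, by simp⟩
      · rintro ⟨mid, heq, hmem⟩
        cases mid with
        | nil => simpa using heq
        | cons m ms =>
          simp at heq
          exact absurd (heq.1 ▸ List.mem_cons_self) hmem
    · have hs : pvStepA 2 c = 2 := by simp [pvStepA, h]
      simp only [List.foldl_cons, hs]
      rw [ih]
      constructor
      · rintro ⟨mid, rfl, hmem⟩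
        exact ⟨c :: mid, rfl, by simp [hmem]; exact fun e => h e.symm⟩
      · rintro ⟨mid, heq, hmem⟩
        cases mid with
        | nil => simp at heq; exact absurd heq.1 h
        | cons m ms =>
          simp at heq
          exact ⟨ms, heq.2, fun hm => hmem (by simp [hm])⟩

theorem pvFoldl0 (l : List Char) :
    l.foldl pvStepA 0 = 4 ↔ ∃ rest, l = '/' :: '*' :: rest ∧ rest.foldl pvStepA 2 = 4 := by
  cases l with
  | nil => simp
  | cons c t =>
    by_cases hc : c = '/'
    · subst hc
      cases t with
      | nil => simp [pvStepA]
      | cons d u =>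
        by_cases hd : d = '*'
        · subst hd
          have : pvStepA (pvStepA 0 '/') '*' = 2 := by simp [pvStepA]
          simp [this]
        · have h1 : pvStepA 0 '/' = 1 := by simp [pvStepA]
          have h2 : pvStepA 1 d = -5 := by simp [pvStepA, hd]
          simp [h1, h2, pvFoldlNeg5, hd]
    · have h1 : pvStepA 0 c = -5 := by simp [pvStepA, hc]
      simp [h1, pvFoldlNeg5, hc]

theorem pvChar (l : List Char) :
    l.foldl pvStepA 0 = 4 ↔ ∃ mid, l = '/' :: '*' :: (mid ++ ['*', '/']) ∧ '*' ∉ mid := by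
  rw [pvFoldl0]
  constructor
  · rintro ⟨rest, rfl, h2⟩
    obtain ⟨mid, rfl, hm⟩ := (pvFoldl2 rest).mp h2
    exact ⟨mid, rfl, hm⟩
  · rintro ⟨mid, rfl, hm⟩
    exact ⟨_, rfl, (pvFoldl2 _).mpr ⟨mid, rfl, hm⟩⟩

theorem pvListEquiv (l : List Char) :
    (List.foldl pvStepA 0 l = 4) ↔
      (4 ≤ l.length ∧ (l.take 2 = ['/', '*'] ∧ l.drop (l.length - 2) = ['*', '/']) ∧
        '*' ∉ PySem.List.slice l (some 2) (some (-2))) := by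
  have hsl : PySem.List.slice l (some 2) (some (-2))
      = (l.drop (min 2 l.length)).take (l.length - 2 - min 2 l.length) := by
    simp [PySem.List.slice]
  rw [pvChar]
  constructor
  · rintro ⟨mid, rfl, hm⟩
    have hlen : ('/' :: '*' :: (mid ++ ['*', '/'])).length = mid.length + 4 := by simp
    refine ⟨by simp, ⟨by simp, ?_⟩, ?_⟩
    · have h2 : ('/' :: '*' :: (mid ++ ['*', '/'])).length - 2 = mid.length + 2 := by simp
      rw [h2]
      show (mid ++ ['*', '/']).drop mid.length = ['*', '/']
      exact List.drop_left
    · rw [hsl, hlen]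
      have e1 : min 2 (mid.length + 4) = 2 := by omega
      have e2 : mid.length + 4 - 2 - 2 = mid.length := by omega
      rw [e1, e2]
      show '*' ∉ (mid ++ ['*', '/']).take mid.length
      rw [List.take_left]
      exact hm
  · rintro ⟨h4, ⟨ht, hd⟩, hs⟩
    refine ⟨(l.drop 2).take (l.length - 4), ?_, ?_⟩
    · conv_lhs => rw [← List.take_append_drop 2 l]
      rw [ht]
      have : l.drop 2 = (l.drop 2).take (l.length - 4) ++ (l.drop 2).drop (l.length - 4) := by
        rw [List.take_append_drop]
      conv_lhs => rw [this]
      have hdd : (l.drop 2).drop (l.length - 4) = l.drop (l.length - 2) := by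
        rw [List.drop_drop]
        congr 1
        omega
      rw [hdd, hd]
      simp
    · rw [hsl] at hs
      have e2 : l.length - 2 - 2 = l.length - 4 := by omega
      simp only [show min 2 l.length = 2 from by omega, e2] at hs
      exact hs

-- ===== VERDICT (by name: the statement is the Claim_ definition above) =====
theorem afd_cmultilinea_spec : Claim_equal_afd_cmultilinea := by
  intro lexema _
  show afd_cmultilinea lexema = afd_cmultilinea_alt lexema
  rw [Bool.eq_iff_iff]
  unfold afd_cmultilinea afd_cmultilinea_alt
  simp only [List.mem_singleton]
  simp [pysem, ← String.toList_inj, List.singleton_infix_iff, PySem.Str.isIn]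
  rw [pvListEquiv]
  rw [← String.length_toList]
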